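-- pv_equiv track=rewrite | github.com/gdsyzxSquare/forgenote | src/modules/markdown_beautifier.py | _format_code_blocks
-- ===== SOURCE A (Python) =====
-- def _format_code_blocks(content: str) -> str:
--     """
--     格式化代码块
--
--     Args:
--         content: 原始内容
--
--     Returns:
--         格式化后的内容
--     """
--     # 确保代码块有语言标识
--     # 这里是简单实现，可以根据需要扩展
--
--     lines = content.split('\n')
--     result = []
--     in_code_block = False
--
--     for line in lines:
--         if line.strip().startswith('```'):
--             if not in_code_block:
--                 # 代码块开始
--                 if line.strip() == '```':
--                     # 没有指定语言，尝试推断或使用默认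
--                     result.append('```python')  # 默认使用python
--                 else:
--                     result.append(line)
--                 in_code_block = True
--             else:
--                 # 代码块结束
--                 result.append(line)
--                 in_code_block = False
--         else:
--             result.append(line)
--
--     return '\n'.join(result)
-- ===== SOURCE B (Python) =====
-- def _format_code_blocks(content: str) -> str:
--     def is_fence(line):
--         return line.strip().startswith('```')
--
--     lines = content.split('\n')
--     out = []
--     i = 0
--     n = len(lines)
--     while i < n:
--         line = lines[i]
--         if is_fence(line):
--             # opening fence: add default language if bare
--             out.append('```python' if line.strip() == '```' else line)
--             i += 1
--             # copy the block body up to (and including) the closing fence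
--             while i < n and not is_fence(lines[i]):
--                 out.append(lines[i])
--                 i += 1
--             if i < n:
--                 out.append(lines[i])
--                 i += 1
--         else:
--             out.append(line)
--             i += 1
--     return '\n'.join(out)
-- ===== Notes on version B (the rewrite author's own statement) =====
-- stated objective: alternative
-- what changed: Replaces A's single pass with an in_code_block toggle flag by a block-structured scan that, at each opening fence, copies the whole block body up to its closing fence with an inner loop, so no boolean state is carried across lines.
import Mathlib
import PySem

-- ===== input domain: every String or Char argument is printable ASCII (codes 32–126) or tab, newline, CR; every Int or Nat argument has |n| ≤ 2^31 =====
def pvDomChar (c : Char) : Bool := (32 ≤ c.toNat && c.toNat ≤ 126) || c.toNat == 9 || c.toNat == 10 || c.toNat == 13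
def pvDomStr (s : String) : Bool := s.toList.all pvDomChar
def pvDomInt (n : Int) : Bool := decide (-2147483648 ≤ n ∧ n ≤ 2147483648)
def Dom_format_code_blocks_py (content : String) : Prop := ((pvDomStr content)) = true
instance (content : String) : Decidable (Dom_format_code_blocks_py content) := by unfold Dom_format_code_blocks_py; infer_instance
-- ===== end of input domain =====

-- B replaces A's toggle-flag single pass by a block-structured scan (opener, then body+closer copied by an inner loop); same output, similar cost.

-- ===== PORT A =====
-- the loop over lines, carrying A's in_code_block flag
def fcbLoopA : List String → Bool → List String
  | [], _ => []
  | l :: ls, b =>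
    if PySem.Str.startswith (PySem.Str.strip l) "```" then
      if !b then
        (if PySem.Str.strip l == "```" then "```python" else l) :: fcbLoopA ls true
      else
        l :: fcbLoopA ls false
    else
      l :: fcbLoopA ls b

def format_code_blocks_py (content : String) : String :=
  PySem.Str.join "\n" (fcbLoopA ((PySem.Str.split? content "\n").getD []) false)

-- ===== PORT B =====
-- Source B's is_fence helper
def fcbIsFence (l : String) : Bool := PySem.Str.startswith (PySem.Str.strip l) "```"

-- the outer while loop; fcbClose is the step after the inner while loop finished
mutual
def fcbLoopB : List String → List String
  | [] => []
  | l :: ls =>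
    if fcbIsFence l then
      (if PySem.Str.strip l == "```" then "```python" else l) ::
        (ls.takeWhile (fun x => !fcbIsFence x) ++
          fcbClose (ls.dropWhile (fun x => !fcbIsFence x)))
    else
      l :: fcbLoopB ls
termination_by ls => ls.length
decreasing_by
  · exact Nat.lt_succ_of_le (List.length_dropWhile_le _ _)
  · exact Nat.lt_succ_self _
def fcbClose : List String → List String
  | [] => []
  | c :: rs => c :: fcbLoopB rs
termination_by ls => ls.length
decreasing_by exact Nat.lt_succ_self _
end

def format_code_blocks_py_alt (content : String) : String :=
  PySem.Str.join "\n" (fcbLoopB ((PySem.Str.split? content "\n").getD []))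

-- ===== PRECONDITION & SPEC =====
def Spec_format_code_blocks_py (content : String) (out : String) : Prop := out = format_code_blocks_py_alt content
instance (content : String) (out : String) : Decidable (Spec_format_code_blocks_py content out) := by unfold Spec_format_code_blocks_py; infer_instance

-- ===== CLAIM (what is proved, stated in full; the proofs are below) =====
def Claim_equal_format_code_blocks_py : Prop := ∀ (content : String), Dom_format_code_blocks_py content → Spec_format_code_blocks_py content (format_code_blocks_py content)

-- ===== LEMMAS AND PROOFS =====

-- joint invariant: A's flag=false run matches fcbLoopB; its flag=true run matches "copy body, then close"
theorem fcbLoopA_eq (n : Nat) : ∀ ls : List String, ls.length ≤ n →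
    fcbLoopA ls false = fcbLoopB ls ∧
    fcbLoopA ls true =
      ls.takeWhile (fun x => !fcbIsFence x) ++ fcbClose (ls.dropWhile (fun x => !fcbIsFence x)) := by
  induction n with
  | zero =>
    intro ls h
    have he : ls = [] := List.eq_nil_of_length_eq_zero (Nat.le_zero.mp h)
    subst he
    exact ⟨by simp [fcbLoopA, fcbLoopB], by simp [fcbLoopA, fcbClose]⟩
  | succ n ih =>
    intro ls h
    cases ls with
    | nil => exact ⟨by simp [fcbLoopA, fcbLoopB], by simp [fcbLoopA, fcbClose]⟩
    | cons l ls =>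
      have hls : ls.length ≤ n := Nat.lt_succ_iff.mp (by simpa using h)
      have h1 := (ih ls hls).1
      have h2 := (ih ls hls).2
      by_cases hf : fcbIsFence l = true
      · have hfA : PySem.Str.startswith (PySem.Str.strip l) "```" = true := hf
        constructor
        · simp only [fcbLoopA, fcbLoopB]
          rw [if_pos hfA, if_pos hf, if_pos (show (!false) = true from rfl), h2]
        · simp only [fcbLoopA]
          rw [if_pos hfA, if_neg (show ¬((!true) = true) by decide)]
          rw [List.takeWhile_cons_of_neg (by simp [hf]),
              List.dropWhile_cons_of_neg (by simp [hf])]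
          simp only [fcbClose, List.nil_append]
          rw [h1]
      · have hf' : fcbIsFence l = false := by simpa using hf
        have hfA : PySem.Str.startswith (PySem.Str.strip l) "```" = false := hf'
        constructor
        · simp only [fcbLoopA, fcbLoopB]
          rw [if_neg (by simp only [hfA]; decide), if_neg hf, h1]
        · simp only [fcbLoopA]
          rw [if_neg (by simp only [hfA]; decide)]
          rw [List.takeWhile_cons_of_pos (by simp [hf']),
              List.dropWhile_cons_of_pos (by simp [hf'])]
          rw [h2, List.cons_append]

-- ===== VERDICT (by name: the statement is the Claim_ definition above) =====
theorem format_code_blocks_py_spec : Claim_equal_format_code_blocks_py := by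
  intro content _
  unfold Spec_format_code_blocks_py format_code_blocks_py format_code_blocks_py_alt
  exact congrArg _ ((fcbLoopA_eq _ _ le_rfl).1)
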